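-- pv_equiv track=rewrite | github.com/CarlosDLMC/MBID_CF_Herramientas_de_Programacion | ejercicios_a_entregar/practica_1.py | contar_hidrogenos
-- ===== SOURCE A (Python) =====
-- def contar_hidrogenos(molecula):
--     count = 0
--     for i in range(len(molecula)):
--         if molecula[i] == 'H':
--             if i < len(molecula) - 1 and molecula[i + 1].isdigit():
--                 count += int(molecula[i + 1])
--             else:
--                 count += 1
--     return count
-- ===== SOURCE B (Python) =====
-- def contar_hidrogenos(molecula):
--     # Staged approach: split the string on 'H'; every segment after a split marks
--     # one 'H', contributing its leading digit's value (or 1 if none).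
--     total = 0
--     for seg in molecula.split('H')[1:]:
--         if seg and seg[0].isdigit():
--             total += int(seg[0])
--         else:
--             total += 1
--     return total
-- ===== Notes on version B (the rewrite author's own statement) =====
-- stated objective: faster
-- what changed: Replaces A's indexed loop with a one-ahead peek by a staged computation: split the string on the target character and sum one contribution per resulting segment (its leading digit's value, or 1 if it has none), moving the scan into str.split.
import Mathlib
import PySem

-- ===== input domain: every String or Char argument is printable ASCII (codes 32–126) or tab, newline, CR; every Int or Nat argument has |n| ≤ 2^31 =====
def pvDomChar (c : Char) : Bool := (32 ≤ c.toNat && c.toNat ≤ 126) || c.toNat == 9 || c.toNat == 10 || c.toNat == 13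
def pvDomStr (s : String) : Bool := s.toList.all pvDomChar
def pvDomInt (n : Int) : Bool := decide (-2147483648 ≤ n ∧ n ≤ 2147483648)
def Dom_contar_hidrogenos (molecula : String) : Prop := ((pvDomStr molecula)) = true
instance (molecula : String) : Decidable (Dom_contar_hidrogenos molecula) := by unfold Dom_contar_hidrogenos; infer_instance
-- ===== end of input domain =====

-- B replaces A's index loop (peek one ahead at every position) by a staged computation:
-- split the string on 'H', then sum one contribution per segment after a split
-- (its leading digit's value, or 1); same O(n) cost, different decomposition.


-- ===== PORT A =====
-- for i in range(len(molecula)): peek at molecula[i+1]; indices are always in range, so pyGetD is exact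
def contar_hidrogenos (molecula : String) : Int :=
  let l := molecula.toList
  (PySem.List.pyRange 0 (l.length : Int) 1).foldl (fun count i =>
    if PySem.List.pyGetD l i ' ' = 'H' then
      if i < (l.length : Int) - 1 ∧ PySem.Chars.isdigit (PySem.List.pyGetD l (i + 1) ' ') = true then
        count + (PySem.Int.ofChars? [PySem.List.pyGetD l (i + 1) ' ']).getD 0
      else count + 1
    else count) 0

-- ===== PORT B =====
-- Source B: for seg in molecula.split('H')[1:]: total += int(seg[0]) if seg and seg[0].isdigit() else 1
def contar_hidrogenos_alt (molecula : String) : Int :=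
  ((molecula.toList.splitOn 'H').tail).foldl (fun total seg =>
    match seg with
    | d :: _ => if PySem.Chars.isdigit d then total + (PySem.Int.ofChars? [d]).getD 0 else total + 1
    | [] => total + 1) 0

-- ===== PRECONDITION & SPEC =====
def Spec_contar_hidrogenos (molecula : String) (out : Int) : Prop := out = contar_hidrogenos_alt molecula
instance (molecula : String) (out : Int) : Decidable (Spec_contar_hidrogenos molecula out) := by unfold Spec_contar_hidrogenos; infer_instance

-- ===== CLAIM (what is proved, stated in full; the proofs are below) =====
def Claim_equal_contar_hidrogenos : Prop := ∀ (molecula : String), Dom_contar_hidrogenos molecula → Spec_contar_hidrogenos molecula (contar_hidrogenos molecula)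

-- ===== LEMMAS AND PROOFS =====

-- per-index contribution of A's loop
def contrib (l : List Char) (i : Nat) : Int :=
  if l.getD i ' ' = 'H' then
    if (i : Int) < (l.length : Int) - 1 ∧ PySem.Chars.isdigit (l.getD (i + 1) ' ') = true then
      (PySem.Int.ofChars? [l.getD (i + 1) ' ']).getD 0
    else 1
  else 0

-- per-segment contribution of B's loop
def segVal (seg : List Char) : Int :=
  match seg with
  | d :: _ => if PySem.Chars.isdigit d then (PySem.Int.ofChars? [d]).getD 0 else 1
  | [] => 1

theorem foldl_add_f {b : Type} (f : b → Int) (r : List b) (t : Int) :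
    r.foldl (fun a x => a + f x) t = t + (r.map f).sum := by
  induction r generalizing t with
  | nil => simp
  | cons x xs ih => simp [List.foldl_cons, ih]; ring

theorem foldl_ext {a b : Type} (f g : a → b → a) (h : ∀ x y, f x y = g x y)
    (r : List b) (init : a) : r.foldl f init = r.foldl g init := by
  induction r generalizing init with
  | nil => rfl
  | cons x xs ih => simp only [List.foldl_cons, h, ih]

theorem contrib_shift (x : Char) (l : List Char) (i : Nat) :
    contrib (x :: l) (i + 1) = contrib l i := by
  unfold contrib
  have h1 : (x :: l).getD (i + 1) ' ' = l.getD i ' ' := rfl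
  have h2 : (x :: l).getD (i + 1 + 1) ' ' = l.getD (i + 1) ' ' := rfl
  rw [h1, h2]
  have h3 : (((i + 1 : Nat) : Int) < ((x :: l).length : Int) - 1) ↔ ((i : Int) < (l.length : Int) - 1) := by
    simp; omega
  simp only [h3]

theorem sum_contrib_cons (x : Char) (l : List Char) :
    ((List.range (x :: l).length).map (contrib (x :: l))).sum
      = contrib (x :: l) 0 + ((List.range l.length).map (contrib l)).sum := by
  rw [List.length_cons, List.range_succ_eq_map, List.map_cons, List.map_map, List.sum_cons]
  have : (List.range l.length).map (contrib (x :: l) ∘ Nat.succ)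
      = (List.range l.length).map (contrib l) := by
    apply List.map_congr_left; intro i _
    exact contrib_shift x l i
  rw [this]

theorem splitOn_eq (l : List Char) : l.splitOn 'H' = List.splitOnP (· == 'H') l := rfl

-- B's contribution for the segment started by an 'H' equals A's contribution at that 'H'
theorem segVal_head (xs : List Char) :
    segVal ((xs.splitOn 'H').headD []) = contrib ('H' :: xs) 0 := by
  cases xs with
  | nil => decide
  | cons y ys =>
    rw [splitOn_eq, List.splitOnP_cons]
    by_cases hy : y = 'H'
    · subst hy
      simp only [beq_self_eq_true, if_true, List.headD_cons]
      have : contrib ('H' :: 'H' :: ys) 0 = 1 := by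
        unfold contrib; simp [show PySem.Chars.isdigit 'H' = false by decide]
      rw [this]; rfl
    · have hb : (y == 'H') = false := by simp [hy]
      rw [hb]
      simp only [Bool.false_eq_true, if_false]
      obtain ⟨h, t, e⟩ := List.exists_cons_of_ne_nil (List.splitOnP_ne_nil (· == 'H') ys)
      rw [e]
      have hc : contrib ('H' :: y :: ys) 0
          = if PySem.Chars.isdigit y then (PySem.Int.ofChars? [y]).getD 0 else 1 := by
        unfold contrib
        have e1 : ('H' :: y :: ys).getD 0 ' ' = 'H' := rfl
        have e2 : ('H' :: y :: ys).getD (0 + 1) ' ' = y := rfl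
        rw [e1, e2, if_pos rfl]
        have hlt : ((0 : Nat) : Int) < (('H' :: y :: ys).length : Int) - 1 := by
          simp
        by_cases hd : PySem.Chars.isdigit y
        · rw [if_pos ⟨hlt, hd⟩, if_pos hd]
        · rw [if_neg (fun hcon => hd hcon.2), if_neg hd]
      rw [hc]; rfl

theorem sum_segVal_eq : ∀ (l : List Char),
    (((l.splitOn 'H').tail).map segVal).sum = ((List.range l.length).map (contrib l)).sum
  | [] => by decide
  | x :: xs => by
    rw [sum_contrib_cons, splitOn_eq, List.splitOnP_cons]
    by_cases hx : x = 'H'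
    · subst hx
      simp only [beq_self_eq_true, if_true, List.tail_cons]
      obtain ⟨h, t, e⟩ := List.exists_cons_of_ne_nil (List.splitOnP_ne_nil (· == 'H') xs)
      have hh : segVal h = contrib ('H' :: xs) 0 := by
        rw [← segVal_head xs, splitOn_eq, e]; rfl
      have ih := sum_segVal_eq xs
      rw [splitOn_eq, e] at ih
      rw [e, List.map_cons, List.sum_cons, hh]
      simp only [List.tail_cons] at ih
      rw [ih]
    · have hb : (x == 'H') = false := by simp [hx]
      rw [hb]
      simp only [Bool.false_eq_true, if_false, List.tail_modifyHead]
      have hc : contrib (x :: xs) 0 = 0 := by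
        unfold contrib
        simp [List.getD, hx]
      rw [hc, ← splitOn_eq, sum_segVal_eq xs]
      ring

-- A's fold as a sum of per-index contributions
theorem portA_eq_sum (l : List Char) :
    (PySem.List.pyRange 0 (l.length : Int) 1).foldl (fun count i =>
      if PySem.List.pyGetD l i ' ' = 'H' then
        if i < (l.length : Int) - 1 ∧ PySem.Chars.isdigit (PySem.List.pyGetD l (i + 1) ' ') = true then
          count + (PySem.Int.ofChars? [PySem.List.pyGetD l (i + 1) ' ']).getD 0
        else count + 1
      else count) 0 = ((List.range l.length).map (contrib l)).sum := by
  have hbody : ∀ (count : Int) (i : Nat),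
      (if PySem.List.pyGetD l (i : Int) ' ' = 'H' then
        if (i : Int) < (l.length : Int) - 1 ∧ PySem.Chars.isdigit (PySem.List.pyGetD l ((i : Int) + 1) ' ') = true then
          count + (PySem.Int.ofChars? [PySem.List.pyGetD l ((i : Int) + 1) ' ']).getD 0
        else count + 1
      else count) = count + contrib l i := by
    intro count i
    have g1 : PySem.List.pyGetD l (i : Int) ' ' = l.getD i ' ' := by
      simp [PySem.List.pyGetD_natCast]
    have g2 : PySem.List.pyGetD l ((i : Int) + 1) ' ' = l.getD (i + 1) ' ' := by
      rw [show ((i : Int) + 1) = ((i + 1 : Nat) : Int) by push_cast; ring,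
        PySem.List.pyGetD_natCast]
    simp only [contrib, g1, g2]
    split_ifs <;> ring
  rw [PySem.List.pyRange_zero_natCast, List.foldl_map]
  rw [foldl_ext _ _ hbody (List.range l.length) 0, foldl_add_f]
  ring

-- B's fold as a sum of per-segment contributions
theorem portB_eq_sum (l : List Char) :
    ((l.splitOn 'H').tail).foldl (fun total seg =>
      match seg with
      | d :: _ => if PySem.Chars.isdigit d then total + (PySem.Int.ofChars? [d]).getD 0 else total + 1
      | [] => total + 1) 0 = (((l.splitOn 'H').tail).map segVal).sum := by
  have hbody : ∀ (total : Int) (seg : List Char),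
      (match seg with
       | d :: _ => if PySem.Chars.isdigit d then total + (PySem.Int.ofChars? [d]).getD 0 else total + 1
       | [] => total + 1) = total + segVal seg := by
    intro total seg
    cases seg with
    | nil => rfl
    | cons d t => simp only [segVal]; split_ifs <;> ring
  rw [foldl_ext _ _ hbody, foldl_add_f]
  ring

-- ===== VERDICT (by name: the statement is the Claim_ definition above) =====
theorem contar_hidrogenos_spec : Claim_equal_contar_hidrogenos := by
  intro molecula _
  unfold Spec_contar_hidrogenos contar_hidrogenos contar_hidrogenos_alt
  simp only []
  rw [portA_eq_sum, portB_eq_sum, sum_segVal_eq]
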